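-- pv_equiv track=rewrite | github.com/Lukas1121/LogSentinel | multiscale_score.py | group_by_user
-- ===== SOURCE A (Python) =====
-- from collections import defaultdict
--
-- def group_by_user(events):
--     """Returns dict of uid -> events sorted by CreationTime."""
--     user_events = defaultdict(list)
--     for e in events:
--         user_events[e.get("UserId", "")].append(e)
--     return {
--         uid: sorted(evs, key=lambda e: e.get("CreationTime", ""))
--         for uid, evs in user_events.items()
--     }
-- ===== SOURCE B (Python) =====
-- def group_by_user(events):
--     """Returns dict of uid -> events sorted by CreationTime."""
--     order = sorted(events, key=lambda e: e.get("CreationTime", ""))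
--     uids = dict.fromkeys(e.get("UserId", "") for e in events)
--     return {uid: [e for e in order if e.get("UserId", "") == uid] for uid in uids}
-- ===== Notes on version B (the rewrite author's own statement) =====
-- stated objective: alternative
-- what changed: B uses no grouping dict at all: it stably sorts the whole event list once by CreationTime, collects the distinct UserIds in first-appearance order, and builds each user's list by filtering the sorted list, instead of A's fold into a defaultdict followed by a per-bucket sort; it trades A's O(n log n) for O(u*n) filtering when there are many users.
import Mathlib
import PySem

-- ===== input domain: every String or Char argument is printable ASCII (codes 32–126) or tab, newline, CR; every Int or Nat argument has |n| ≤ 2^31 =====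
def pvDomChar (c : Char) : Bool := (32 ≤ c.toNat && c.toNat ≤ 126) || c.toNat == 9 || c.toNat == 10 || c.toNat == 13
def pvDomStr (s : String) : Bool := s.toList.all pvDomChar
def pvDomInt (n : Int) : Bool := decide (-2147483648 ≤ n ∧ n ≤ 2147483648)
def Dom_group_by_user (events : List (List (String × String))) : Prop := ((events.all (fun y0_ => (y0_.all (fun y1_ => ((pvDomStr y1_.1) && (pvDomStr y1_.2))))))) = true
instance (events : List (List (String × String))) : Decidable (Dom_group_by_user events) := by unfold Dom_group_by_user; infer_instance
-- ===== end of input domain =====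

-- B drops A's grouping dict entirely: one stable sort of all events by CreationTime, then one
-- filtered list per distinct UserId (first-appearance order) — an alternative, dict-free decomposition.

-- ===== PORT A =====
-- e.get(k, "") on an event dict (assoc list, first-match lookup)
def pvGet (e : List (String × String)) (k : String) : String := (PySem.Dict.mk e).getD k ""

def group_by_user (events : List (List (String × String))) : List (String × List (List (String × String))) :=
  -- user_events = defaultdict(list); for e in events: user_events[e.get("UserId","")].append(e)
  let user_events := events.foldl (fun d e => d.modify (pvGet e "UserId") [] (· ++ [e])) PySem.Dict.empty
  -- {uid: sorted(evs, key=lambda e: e.get("CreationTime","")) for uid, evs in user_events.items()}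
  user_events.items.map (fun p => (p.1, PySem.List.sorted p.2 (fun e => pvGet e "CreationTime") false))

-- ===== PORT B =====
def group_by_user_alt (events : List (List (String × String))) : List (String × List (List (String × String))) :=
  -- order = sorted(events, key=lambda e: e.get("CreationTime",""))
  let order := PySem.List.sorted events (fun e => pvGet e "CreationTime") false
  -- {uid: [e for e in order if e.get("UserId","") == uid] for uid in dict.fromkeys(...)}
  (PySem.List.dedup (events.map (fun e => pvGet e "UserId"))).map
    (fun uid => (uid, order.filter (fun e => pvGet e "UserId" == uid)))

-- ===== PRECONDITION & SPEC =====
def Spec_group_by_user (events : List (List (String × String))) (out : List (String × List (List (String × String)))) : Prop := out = group_by_user_alt events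
instance (events : List (List (String × String))) (out : List (String × List (List (String × String)))) : Decidable (Spec_group_by_user events out) := by unfold Spec_group_by_user; infer_instance

-- ===== CLAIM (what is proved, stated in full; the proofs are below) =====
def Claim_equal_group_by_user : Prop := ∀ (events : List (List (String × String))), Dom_group_by_user events → Spec_group_by_user events (group_by_user events)

-- ===== LEMMAS AND PROOFS =====

-- insertBy places x at the head when x goes before every element
theorem insertBy_head {α : Type} (bf : α → α → Bool) (x : α) (m : List α)
    (h : ∀ z ∈ m, bf x z = true) : PySem.List.insertBy bf x m = x :: m := by
  cases m with
  | nil => rfl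
  | cons z zs => simp [PySem.List.insertBy, h z (by simp)]

-- insertBy preserves key-sortedness
theorem insertBy_pairwise {α κ : Type} [LinearOrder κ] (key : α → κ) (x : α) (m : List α)
    (h : m.Pairwise (fun a b => key a ≤ key b)) :
    (PySem.List.insertBy (fun a b => decide (key a < key b)) x m).Pairwise (fun a b => key a ≤ key b) := by
  induction m with
  | nil => simp [PySem.List.insertBy]
  | cons y ys ih =>
    rcases List.pairwise_cons.mp h with ⟨hy, hys⟩
    by_cases hxy : key x < key y
    · simp only [PySem.List.insertBy, decide_eq_true_eq, if_pos hxy]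
      refine List.pairwise_cons.mpr ⟨?_, h⟩
      intro z hz
      rcases List.mem_cons.mp hz with hz | hz
      · exact hz ▸ le_of_lt hxy
      · exact le_trans (le_of_lt hxy) (hy z hz)
    · simp only [PySem.List.insertBy, decide_eq_true_eq, if_neg hxy]
      refine List.pairwise_cons.mpr ⟨?_, ih hys⟩
      intro z hz
      rcases (PySem.List.mem_insertBy _ _ _ _).mp hz with hz | hz
      · exact hz ▸ le_of_not_gt hxy
      · exact hy z hz

-- filter commutes with insertBy into a key-sorted list (the stability argument, one step)
theorem filter_insertBy {α κ : Type} [LinearOrder κ] (key : α → κ) (p : α → Bool) (x : α) (m : List α)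
    (h : m.Pairwise (fun a b => key a ≤ key b)) :
    (PySem.List.insertBy (fun a b => decide (key a < key b)) x m).filter p
      = if p x then PySem.List.insertBy (fun a b => decide (key a < key b)) x (m.filter p) else m.filter p := by
  induction m with
  | nil => by_cases hp : p x <;> simp [PySem.List.insertBy, hp]
  | cons y ys ih =>
    rcases List.pairwise_cons.mp h with ⟨hy, hys⟩
    by_cases hxy : key x < key y
    · simp only [PySem.List.insertBy, decide_eq_true_eq, if_pos hxy]
      by_cases hp : p x
      · by_cases hpy : p y
        · simp [List.filter_cons, hp, hpy, PySem.List.insertBy, hxy]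
        · have h0 : PySem.List.insertBy (fun a b => decide (key a < key b)) x (List.filter p ys)
              = x :: List.filter p ys := by
            refine insertBy_head _ _ _ ?_
            intro z hz
            simp only [decide_eq_true_eq]
            exact lt_of_lt_of_le hxy (hy z (List.mem_of_mem_filter hz))
          simp [List.filter_cons, hp, hpy, h0]
      · by_cases hpy : p y <;> simp [List.filter_cons, hp, hpy, PySem.List.insertBy, hxy]
    · simp only [PySem.List.insertBy, decide_eq_true_eq, if_neg hxy]
      by_cases hpy : p y
      · simp only [List.filter_cons, hpy, if_pos, ih hys]
        by_cases hp : p x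
        · simp [hp, PySem.List.insertBy, hxy]
        · simp [hp]
      · simp [hpy, ih hys]

-- filter commutes with the whole insertion-sort fold
theorem filter_sort_fold {α κ : Type} [LinearOrder κ] (key : α → κ) (p : α → Bool) (xs m : List α)
    (h : m.Pairwise (fun a b => key a ≤ key b)) :
    (xs.foldl (fun acc x => PySem.List.insertBy (fun a b => decide (key a < key b)) x acc) m).filter p
      = (xs.filter p).foldl (fun acc x => PySem.List.insertBy (fun a b => decide (key a < key b)) x acc) (m.filter p) := by
  induction xs generalizing m with
  | nil => simp
  | cons x xs ih =>
    simp only [List.foldl_cons, List.filter_cons]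
    rw [ih _ (insertBy_pairwise key x m h), filter_insertBy key p x m h]
    by_cases hp : p x <;> simp [hp]

-- STABILITY: sorting then filtering = filtering then sorting
theorem sorted_filter {α κ : Type} [LinearOrder κ] (key : α → κ) (p : α → Bool) (xs : List α) :
    (PySem.List.sorted xs key false).filter p = PySem.List.sorted (xs.filter p) key false := by
  rw [PySem.List.sorted_eq_foldl_insertBy, PySem.List.sorted_eq_foldl_insertBy]
  simpa using filter_sort_fold key p xs [] (by simp)

-- per-key contents of A's grouping fold
theorem getD_groupFold {α κ : Type} [BEq κ] [LawfulBEq κ] [DecidableEq κ] (f : α → κ)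
    (l : List α) (d : PySem.Dict κ (List α)) (c : κ) :
    (l.foldl (fun d e => d.modify (f e) [] (· ++ [e])) d).getD c []
      = d.getD c [] ++ l.filter (fun e => f e == c) := by
  induction l generalizing d with
  | nil => simp
  | cons e l ih =>
    simp only [List.foldl_cons, List.filter_cons, ih, PySem.Dict.getD_modify]
    by_cases hc : c = f e
    · simp [hc]
    · have : (f e == c) = false := by simpa using fun h => hc h.symm
      simp [hc, this]

-- keys of A's grouping fold: first-appearance order of the grouping key
theorem keys_groupFold {α κ : Type} [BEq κ] [LawfulBEq κ] (f : α → κ)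
    (l : List α) (d : PySem.Dict κ (List α)) :
    (l.foldl (fun d e => d.modify (f e) [] (· ++ [e])) d).keys
      = PySem.Set.update d.keys (l.map f) := by
  induction l generalizing d with
  | nil => simp [PySem.Set.update]
  | cons e l ih =>
    simp only [List.foldl_cons, List.map_cons, PySem.Set.update_cons, ih]
    congr 1
    rw [PySem.Dict.keys_modify]
    by_cases h : d.contains (f e) = true
    · rw [PySem.Dict.keys_insert_of_contains _ _ h,
        PySem.Set.add_of_mem ((PySem.Dict.contains_iff_mem_keys _ _).mp h)]
    · have h' : d.contains (f e) = false := by simpa using h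
      rw [PySem.Dict.keys_insert_of_not_contains _ _ h',
        PySem.Set.add_of_not_mem]
      intro hm
      exact h ((PySem.Dict.contains_iff_mem_keys _ _).mpr hm)

-- a dict with nodup keys is its key list paired with its lookups (list form)
theorem items_eq_map_keys {κ ν : Type} [BEq κ] [LawfulBEq κ] (l : List (κ × ν)) (d0 : ν)
    (h : (l.map Prod.fst).Nodup) :
    l = (l.map Prod.fst).map (fun k => (k, (PySem.Dict.mk l).getD k d0)) := by
  induction l with
  | nil => rfl
  | cons p rest ih =>
    obtain ⟨k, v⟩ := p
    simp only [List.map_cons] at h ⊢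
    rcases List.nodup_cons.mp h with ⟨hk, hrest⟩
    have hhead : (PySem.Dict.mk ((k, v) :: rest)).getD k d0 = v := by
      simp [PySem.Dict.getD_eq_get?_getD, PySem.Dict.get?_mk_cons]
    rw [hhead]
    congr 1
    rw [List.map_congr_left (fun k' hk' => ?_), ← ih hrest]
    have hne : (k == k') = false := by
      simp only [beq_eq_false_iff_ne, ne_eq]
      intro he
      exact hk (he ▸ hk')
    simp [PySem.Dict.getD_eq_get?_getD, PySem.Dict.get?_mk_cons, hne]

-- a dict with nodup keys is its key list paired with its lookups
theorem items_char {κ ν : Type} [BEq κ] [LawfulBEq κ] (d : PySem.Dict κ ν) (d0 : ν)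
    (h : d.keys.Nodup) : d.items = d.keys.map (fun k => (k, d.getD k d0)) := by
  obtain ⟨l⟩ := d
  have hk : (PySem.Dict.mk l : PySem.Dict κ ν).keys = l.map Prod.fst := by
    simp [PySem.Dict.keys_mk]
  rw [hk] at h ⊢
  exact items_eq_map_keys l d0 h

theorem main_eq (events : List (List (String × String))) :
    group_by_user events = group_by_user_alt events := by
  simp only [group_by_user, group_by_user_alt]
  have hkeys : (events.foldl (fun d e => d.modify (pvGet e "UserId") [] (· ++ [e])) PySem.Dict.empty).keys
      = PySem.Set.ofList (events.map (fun e => pvGet e "UserId")) := by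
    rw [keys_groupFold]
    simp [PySem.Set.update_nil_left]
  have hnodup := hkeys ▸ PySem.Set.nodup_ofList (events.map (fun e => pvGet e "UserId"))
  rw [items_char _ [] hnodup, hkeys, List.map_map, PySem.List.dedup_eq_ofList]
  refine List.map_congr_left (fun k hk => ?_)
  simp only [Function.comp]
  congr 1
  rw [getD_groupFold, sorted_filter]
  simp [PySem.Dict.getD_empty]

-- ===== VERDICT (by name: the statement is the Claim_ definition above) =====
theorem group_by_user_spec : Claim_equal_group_by_user := by
  intro events _
  exact main_eq events
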